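-- pv_equiv track=rewrite | github.com/mintropy/PS | BAEKJOON/Python/2000/2100/2104.py | solution
-- ===== SOURCE A (Python) =====
-- def solution(seq: tuple) -> int:
--     stack = []
--     answer = 0
--     now = 0
--     for x in seq:
--         left = now
--         while stack and x < stack[-1][0]:
--             y, left = stack.pop()
--             answer = max(answer, y * (now - left))
--         stack.append((x, left))
--         now += x
--     return max(answer, *(x * (now - left) for x, left in stack))
-- ===== SOURCE B (Python) =====
-- def solution(seq: tuple) -> int:
--     n = len(seq)
--     pref = [0]
--     s = 0
--     for x in seq:
--         s += x
--         pref.append(s)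
--     best = 0
--     for i in range(n):
--         l = i
--         while l > 0 and seq[l - 1] > seq[i]:
--             l -= 1
--         r = i + 1
--         while r < n and seq[r] >= seq[i]:
--             r += 1
--         best = max(best, seq[i] * (pref[r] - pref[l]))
--     return best
-- ===== Notes on version B (the rewrite author's own statement) =====
-- stated objective: alternative
-- what changed: A runs one left-to-right monotonic-stack pass over running sums; B instead precomputes a prefix-sum array and, for each index i, scans outward for the nearest left element <= seq[i] and nearest right element < seq[i], taking max(0, seq[i]*(pref[r]-pref[l])) over all i.
import Mathlib
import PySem

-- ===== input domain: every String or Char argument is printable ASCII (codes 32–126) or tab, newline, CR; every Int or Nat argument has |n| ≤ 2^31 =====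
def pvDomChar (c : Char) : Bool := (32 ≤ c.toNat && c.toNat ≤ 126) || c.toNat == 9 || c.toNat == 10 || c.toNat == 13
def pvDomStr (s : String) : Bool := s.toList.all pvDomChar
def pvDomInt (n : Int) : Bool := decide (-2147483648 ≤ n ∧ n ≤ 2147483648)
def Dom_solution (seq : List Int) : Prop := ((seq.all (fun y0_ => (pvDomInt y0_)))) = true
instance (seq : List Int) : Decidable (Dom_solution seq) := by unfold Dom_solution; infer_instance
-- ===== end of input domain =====

-- B replaces A's single monotonic-stack pass by a prefix-sum array plus, per index, outward
-- scans for the nearest smaller-or-equal (left) / strictly smaller (right) neighbour: an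
-- alternative algorithm for the same value, not claimed faster.

-- ===== PORT A =====
-- The Python stack has its top at the end of the list; the port stores the stack top-first
-- (push = cons, pop = head), holding exactly the same pairs; the final generator iterates
-- the Python stack bottom-to-top, hence `stack.reverse` in `solution`.
def popA (x : Int) : List (Int × Int) → Int → Int → Int → List (Int × Int) × Int × Int
  | [], answer, _, left => ([], answer, left)
  | (y, l) :: rest, answer, now, left =>
      if x < y then popA x rest (max answer (y * (now - l))) now l
      else ((y, l) :: rest, answer, left)

def stepA (st : List (Int × Int) × Int × Int) (x : Int) : List (Int × Int) × Int × Int :=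
  let (stack, answer, now) := st
  let (stack', answer', left) := popA x stack answer now now
  ((x, left) :: stack', answer', now + x)

def solution (seq : List Int) : Int :=
  let (stack, answer, now) := seq.foldl stepA ([], 0, 0)
  -- Python: max(answer, *(x * (now - left) for x, left in stack)); raises on an empty stack (see Pre_)
  (stack.reverse.map (fun p => p.1 * (now - p.2))).foldl max answer

-- ===== PORT B =====
-- while l > 0 and seq[l-1] > seq[i]: l -= 1   (all indices are in range, so getD is exact)
def goLeft (seq : List Int) (x : Int) (l : Nat) : Nat :=
  if h : 0 < l ∧ x < seq.getD (l - 1) 0 then goLeft seq x (l - 1) else l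
termination_by l
decreasing_by omega

-- while r < n and seq[r] >= seq[i]: r += 1
def goRight (seq : List Int) (x : Int) (n r : Nat) : Nat :=
  if h : r < n ∧ x ≤ seq.getD r 0 then goRight seq x n (r + 1) else r
termination_by n - r
decreasing_by omega

-- pref = [0]; s = 0; for x in seq: s += x; pref.append(s)
def prefixList (seq : List Int) : List Int :=
  (seq.foldl (fun ps x => (ps.1 ++ [ps.2 + x], ps.2 + x)) ([0], 0)).1

def solution_alt (seq : List Int) : Int :=
  let n := seq.length
  let pref := prefixList seq
  (List.range n).foldl (fun best i =>
    let x := seq.getD i 0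
    let l := goLeft seq x i
    let r := goRight seq x n (i + 1)
    max best (x * (pref.getD r 0 - pref.getD l 0))) 0

-- ===== PRECONDITION & SPEC =====
-- Pre_ excludes only the empty sequence, on which the Python A raises TypeError
-- (max() is handed a single int once the starred generator is empty).
def Pre_solution (seq : List Int) : Prop := seq ≠ []
instance (seq : List Int) : Decidable (Pre_solution seq) := by unfold Pre_solution; infer_instance
def pvWitness_solution : List Int := [2, 1, 2]

def Spec_solution (seq : List Int) (out : Int) : Prop := out = solution_alt seq
instance (seq : List Int) (out : Int) : Decidable (Spec_solution seq out) := by unfold Spec_solution; infer_instance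

-- ===== CLAIM (what is proved, stated in full; the proofs are below) =====
def Claim_equal_solution : Prop := ∀ (seq : List Int), Dom_solution seq → Pre_solution seq → Spec_solution seq (solution seq)

-- ===== LEMMAS AND PROOFS =====

set_option maxHeartbeats 1000000

-- element i of seq (all accesses are in range where used)
def gI (seq : List Int) (i : Nat) : Int := seq.getD i 0
-- prefix sum of the first j elements
def PS (seq : List Int) (j : Nat) : Int := (seq.take j).sum
-- i survives the first k elements: nothing strictly smaller appears in (i, k)
def survB (seq : List Int) (k i : Nat) : Bool := decide (∀ j, j < k → i < j → gI seq i ≤ gI seq j)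
-- survivors (= stack contents, bottom first) and non-survivors among the first k indices
def SL (seq : List Int) (k : Nat) : List Nat := (List.range k).filter (survB seq k)
def NS (seq : List Int) (k : Nat) : List Nat := (List.range k).filter (fun i => ! survB seq k i)
-- canonical boundaries and candidate value of index i
def Ldef (seq : List Int) (i : Nat) : Nat := goLeft seq (gI seq i) i
def Rdef (seq : List Int) (i : Nat) : Nat := goRight seq (gI seq i) seq.length (i + 1)
def cand (seq : List Int) (i : Nat) : Int := gI seq i * (PS seq (Rdef seq i) - PS seq (Ldef seq i))

theorem survB_iff (seq : List Int) (k i : Nat) :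
    survB seq k i = true ↔ ∀ j, j < k → i < j → gI seq i ≤ gI seq j := by
  simp [survB]

theorem mem_SL (seq : List Int) (k i : Nat) :
    i ∈ SL seq k ↔ i < k ∧ survB seq k i = true := by
  simp [SL, List.mem_filter]

theorem PS_succ (seq : List Int) (k : Nat) (h : k < seq.length) :
    PS seq (k + 1) = PS seq k + gI seq k := by
  have ht : seq.take (k + 1) = seq.take k ++ [seq[k]] := by
    rw [List.take_add_one]
    simp [List.getElem?_eq_getElem h]
  unfold PS gI
  rw [ht, List.sum_append, List.getD_eq_getElem seq 0 h]
  simp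

theorem goLeft_le (seq : List Int) (x : Int) (l : Nat) : goLeft seq x l ≤ l := by
  induction l using Nat.strong_induction_on with
  | _ l ih =>
    rw [goLeft]
    split
    · next h =>
      have := ih (l - 1) (by omega)
      omega
    · omega

theorem goLeft_eq_of (seq : List Int) (x : Int) (l l' : Nat) (hle : l' ≤ l)
    (hmid : ∀ j, l' ≤ j → j < l → x < gI seq j)
    (hstop : l' = 0 ∨ seq.getD (l' - 1) 0 ≤ x) : goLeft seq x l = l' := by
  induction l using Nat.strong_induction_on generalizing l' with
  | _ l ih =>
    rw [goLeft]
    split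
    · next h =>
      obtain ⟨hpos, hlt⟩ := h
      have hne : l' ≠ l := by
        rintro rfl
        rcases hstop with h0 | hle2
        · omega
        · exact absurd hlt (not_lt.mpr hle2)
      exact ih (l - 1) (by omega) l' (by omega) (fun j hj1 hj2 => hmid j hj1 (by omega)) hstop
    · next h =>
      by_contra hne
      have hl : l' < l := by omega
      have h1 : x < gI seq (l - 1) := hmid (l - 1) (by omega) (by omega)
      exact h ⟨by omega, h1⟩

theorem goRight_le (seq : List Int) (x : Int) (n r : Nat) (h : r ≤ n) : goRight seq x n r ≤ n := by
  have H : ∀ d r, n - r ≤ d → r ≤ n → goRight seq x n r ≤ n := by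
    intro d
    induction d with
    | zero =>
      intro r h1 h2
      rw [goRight]
      split
      · next hc => omega
      · exact h2
    | succ d ih =>
      intro r h1 h2
      rw [goRight]
      split
      · next hc => exact ih (r + 1) (by omega) (by omega)
      · exact h2
  exact H (n - r) r le_rfl h

theorem goRight_eq_of (seq : List Int) (x : Int) (n r r' : Nat) (hle : r ≤ r') (hn : r' ≤ n)
    (hmid : ∀ j, r ≤ j → j < r' → x ≤ gI seq j)
    (hstop : r' = n ∨ gI seq r' < x) : goRight seq x n r = r' := by
  have H : ∀ d r, r' - r ≤ d → r ≤ r' → (∀ j, r ≤ j → j < r' → x ≤ gI seq j) →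
      goRight seq x n r = r' := by
    intro d
    induction d with
    | zero =>
      intro r h1 h2 h3
      have hrr : r = r' := by omega
      subst hrr
      rw [goRight]
      split
      · next hc =>
        rcases hstop with h0 | h0
        · omega
        · exact absurd hc.2 (not_le.mpr h0)
      · rfl
    | succ d ih =>
      intro r h1 h2 h3
      rw [goRight]
      split
      · next hc =>
        have hrr : r ≠ r' := by
          rintro rfl
          rcases hstop with h0 | h0
          · omega
          · exact absurd hc.2 (not_le.mpr h0)
        exact ih (r + 1) (by omega) (by omega) (fun j hj1 hj2 => h3 j (by omega) hj2)
      · next hc =>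
        by_contra hne
        have hrr : r < r' := lt_of_le_of_ne h2 hne
        have h4 : x ≤ gI seq r := h3 r le_rfl hrr
        exact hc ⟨by omega, h4⟩
  exact H (r' - r) r le_rfl hle hmid

-- the running sums appended by B's prefix loop
def sumsFrom (s : Int) : List Int → List Int
  | [] => []
  | x :: xs => (s + x) :: sumsFrom (s + x) xs

theorem prefAux (seq : List Int) : ∀ (acc : List Int) (s : Int),
    (seq.foldl (fun ps x => (ps.1 ++ [ps.2 + x], ps.2 + x)) (acc, s)).1 = acc ++ sumsFrom s seq := by
  induction seq with
  | nil => intro acc s; simp [sumsFrom]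
  | cons x xs ih =>
    intro acc s
    simp only [List.foldl_cons]
    rw [ih (acc ++ [s + x]) (s + x)]
    simp [sumsFrom]

theorem sumsFrom_getD (seq : List Int) : ∀ (j : Nat) (s : Int), j < seq.length →
    (sumsFrom s seq).getD j 0 = s + PS seq (j + 1) := by
  induction seq with
  | nil => intro j s h; simp at h
  | cons x xs ih =>
    intro j s h
    cases j with
    | zero => simp [sumsFrom, PS]
    | succ j =>
      simp only [sumsFrom, List.getD_cons_succ]
      rw [ih j (s + x) (by simpa using h)]
      have h2 : PS (x :: xs) (j + 1 + 1) = x + PS xs (j + 1) := by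
        simp [PS, List.take_succ_cons]
      omega

theorem pref_getD (seq : List Int) (j : Nat) (h : j ≤ seq.length) :
    (prefixList seq).getD j 0 = PS seq j := by
  have hpl : prefixList seq = 0 :: sumsFrom 0 seq := by
    have h0 := prefAux seq [0] 0
    simpa [prefixList] using h0
  rw [hpl]
  cases j with
  | zero => simp [PS]
  | succ j =>
    simp only [List.getD_cons_succ]
    rw [sumsFrom_getD seq j 0 (by omega)]
    omega

theorem alt_eq (seq : List Int) :
    solution_alt seq = ((List.range seq.length).map (cand seq)).foldl max 0 := by
  rw [List.foldl_map]
  simp only [solution_alt]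
  apply PySem.List.foldl_congr_mem
  intro acc i hi
  have hik : i < seq.length := by simpa using hi
  have hR : goRight seq (seq.getD i 0) seq.length (i + 1) ≤ seq.length :=
    goRight_le seq _ _ _ (by omega)
  have hL : goLeft seq (seq.getD i 0) i ≤ seq.length :=
    le_trans (goLeft_le seq _ i) (by omega)
  rw [pref_getD seq _ hR, pref_getD seq _ hL]
  rfl

theorem exists_max_between (p : Nat → Prop) [DecidablePred p] (a b : Nat)
    (h : ∃ j, a ≤ j ∧ j < b ∧ p j) :
    ∃ j, a ≤ j ∧ j < b ∧ p j ∧ ∀ j', j < j' → j' < b → ¬ p j' := by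
  induction b with
  | zero => obtain ⟨j, _, hj, _⟩ := h; omega
  | succ b ih =>
    by_cases hb : p b ∧ a ≤ b
    · exact ⟨b, hb.2, by omega, hb.1, fun j' h1 h2 => absurd h1 (by omega)⟩
    · obtain ⟨j, hj1, hj2, hj3⟩ := h
      have hjb : j < b := by
        rcases Nat.lt_or_ge j b with h' | h'
        · exact h'
        · have hjb2 : j = b := by omega
          subst hjb2
          exact absurd ⟨hj3, hj1⟩ hb
      obtain ⟨jm, m1, m2, m3, m4⟩ := ih ⟨j, hj1, hjb, hj3⟩
      refine ⟨jm, m1, by omega, m3, fun j' h1 h2 => ?_⟩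
      rcases Nat.lt_or_ge j' b with h' | h'
      · exact m4 j' h1 h'
      · have hj'b : j' = b := by omega
        subst hj'b
        intro hpb
        exact hb ⟨hpb, by omega⟩

theorem surv_of_le (seq : List Int) (c : Int) (lo hi k : Nat) (_hhi : hi ≤ k)
    (hj : ∃ j, lo ≤ j ∧ j < hi ∧ gI seq j ≤ c)
    (htail : ∀ j, hi ≤ j → j < k → c ≤ gI seq j) :
    ∃ j, lo ≤ j ∧ j < hi ∧ gI seq j ≤ c ∧ survB seq k j = true := by
  obtain ⟨j, hj1, hj2, hj3, hmax⟩ := exists_max_between (fun j => gI seq j ≤ c) lo hi hj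
  refine ⟨j, hj1, hj2, hj3, ?_⟩
  rw [survB_iff]
  intro j' hj'k hjj'
  rcases Nat.lt_or_ge j' hi with h' | h'
  · have h1 : ¬ gI seq j' ≤ c := hmax j' hjj' h'
    omega
  · have h1 := htail j' h' hj'k
    omega

theorem no_le_in_gap (seq : List Int) (c : Int) (lo hi k : Nat) (hhi : hi ≤ k)
    (htail : ∀ j, hi ≤ j → j < k → c ≤ gI seq j)
    (hnosurv : ∀ j, lo ≤ j → j < hi → survB seq k j = true → c < gI seq j) :
    ∀ j, lo ≤ j → j < hi → c < gI seq j := by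
  intro j h1 h2
  by_contra hcon
  have hle : gI seq j ≤ c := by omega
  obtain ⟨j', a1, a2, a3, a4⟩ := surv_of_le seq c lo hi k hhi ⟨j, h1, h2, hle⟩ htail
  have h5 := hnosurv j' a1 a2 a4
  omega

-- the two closed forms of B's left scan used in the stack invariant
theorem Ldef_eq_zero (seq : List Int) (m k : Nat) (hmk : m ≤ k)
    (htail : ∀ j, m ≤ j → j < k → gI seq m ≤ gI seq j)
    (hnosurv : ∀ j, j < m → survB seq k j = true → gI seq m < gI seq j) :
    Ldef seq m = 0 := by
  apply goLeft_eq_of seq (gI seq m) m 0 (by omega)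
  · exact no_le_in_gap seq (gI seq m) 0 m k hmk htail (fun j _ hj hs => hnosurv j hj hs)
  · left; rfl

theorem Ldef_eq_succ (seq : List Int) (m k t : Nat) (hmk : m ≤ k) (htm : t < m)
    (htle : gI seq t ≤ gI seq m)
    (htail : ∀ j, m ≤ j → j < k → gI seq m ≤ gI seq j)
    (hnosurv : ∀ j, t < j → j < m → survB seq k j = true → gI seq m < gI seq j) :
    Ldef seq m = t + 1 := by
  apply goLeft_eq_of seq (gI seq m) m (t + 1) (by omega)
  · exact no_le_in_gap seq (gI seq m) (t + 1) m k hmk htail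
      (fun j hj1 hj2 hs => hnosurv j (by omega) hj2 hs)
  · right
    simpa [gI] using htle

theorem SL_sorted (seq : List Int) (k : Nat) : (SL seq k).Pairwise (· < ·) :=
  List.pairwise_lt_range.filter _

theorem SL_mono (seq : List Int) (k : Nat) :
    (SL seq k).Pairwise (fun i j => gI seq i ≤ gI seq j) := by
  refine (SL_sorted seq k).imp_of_mem ?_
  intro a b ha hb hab
  have ha' := (mem_SL seq k a).mp ha
  have hb' := (mem_SL seq k b).mp hb
  exact (survB_iff seq k a).mp ha'.2 b hb'.1 hab

theorem mono_filter_split (seq : List Int) (x : Int) (s : List Nat)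
    (hm : s.Pairwise (fun i j => gI seq i ≤ gI seq j)) :
    s = s.filter (fun i => decide (gI seq i ≤ x)) ++ s.filter (fun i => decide (x < gI seq i)) := by
  induction s with
  | nil => rfl
  | cons a t ih =>
    rcases List.pairwise_cons.mp hm with ⟨ha, ht⟩
    by_cases hx : gI seq a ≤ x
    · have h1 : decide (gI seq a ≤ x) = true := by simpa using hx
      have h2 : decide (x < gI seq a) = false := by simpa using not_lt.mpr hx
      simp only [List.filter_cons, h1, h2, if_true, List.cons_append]
      exact congrArg (List.cons a) (ih ht)
    · have hlt : x < gI seq a := not_le.mp hx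
      have hall : ∀ b ∈ t, x < gI seq b := fun b hb => lt_of_lt_of_le hlt (ha b hb)
      have h1 : decide (gI seq a ≤ x) = false := by simpa using hx
      have h2 : decide (x < gI seq a) = true := by simpa using hlt
      have hf1 : t.filter (fun i => decide (gI seq i ≤ x)) = [] :=
        List.filter_eq_nil_iff.mpr (fun b hb => by simpa using not_le.mpr (hall b hb))
      have hf2 : t.filter (fun i => decide (x < gI seq i)) = t :=
        List.filter_eq_self.mpr (fun b hb => by simpa using hall b hb)
      simp [h1, h2, hf1, hf2]

theorem popA_eq (x : Int) (pp : List (Int × Int)) : ∀ (rest : List (Int × Int)),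
    (∀ p ∈ pp, x < p.1) → (∀ y l t', rest = (y, l) :: t' → ¬ x < y) →
    ∀ (answer now left : Int),
    popA x (pp ++ rest) answer now left =
      (rest, pp.foldl (fun a p => max a (p.1 * (now - p.2))) answer,
       ((pp.getLast?).map Prod.snd).getD left) := by
  induction pp with
  | nil =>
    intro rest hpp hrest answer now left
    cases rest with
    | nil => simp [popA]
    | cons p t =>
      obtain ⟨y, l⟩ := p
      have hy : ¬ x < y := hrest y l t rfl
      simp [popA, hy]
  | cons p pp' ih =>
    obtain ⟨y, l⟩ := p
    intro rest hpp hrest answer now left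
    have hxy : x < y := hpp (y, l) (by simp)
    simp only [List.cons_append, popA, if_pos hxy]
    rw [ih rest (fun q hq => hpp q (by simp [hq])) hrest (max answer (y * (now - l))) now l]
    cases pp' with
    | nil => simp
    | cons q t =>
      rw [List.getLast?_cons_cons]
      cases hz : (q :: t).getLast? with
      | none => simp at hz
      | some z => simp

theorem stepA_eq (stack : List (Int × Int)) (ans now x : Int) :
    stepA (stack, (ans, now)) x =
      ((x, (popA x stack ans now now).2.2) :: (popA x stack ans now now).1,
       ((popA x stack ans now now).2.1, now + x)) := rfl

theorem solution_eq (seq : List Int) :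
    solution seq =
      ((seq.foldl stepA ([], 0, 0)).1.reverse.map
        (fun p => p.1 * ((seq.foldl stepA ([], 0, 0)).2.2 - p.2))).foldl max
        (seq.foldl stepA ([], 0, 0)).2.1 := rfl

theorem survB_succ_self (seq : List Int) (k : Nat) : survB seq (k + 1) k = true := by
  rw [survB_iff]
  intro j h1 h2
  omega

theorem survB_false (seq : List Int) (K i : Nat)
    (h : ¬ ∀ j, j < K → i < j → gI seq i ≤ gI seq j) : survB seq K i = false := by
  cases hsv : survB seq K i
  · rfl
  · exact absurd ((survB_iff seq K i).mp hsv) h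

theorem survB_succ (seq : List Int) (k i : Nat) (hik : i < k) :
    survB seq (k + 1) i = (survB seq k i && decide (gI seq i ≤ gI seq k)) := by
  by_cases hA : ∀ j, j < k → i < j → gI seq i ≤ gI seq j
  · have hR1 : survB seq k i = true := (survB_iff seq k i).mpr hA
    by_cases hB : gI seq i ≤ gI seq k
    · have hL : survB seq (k + 1) i = true := by
        rw [survB_iff]
        intro j h1 h2
        rcases Nat.lt_or_ge j k with h' | h'
        · exact hA j h' h2
        · have hjk : j = k := by omega
          subst hjk
          exact hB
      rw [hL, hR1]
      simp [hB]
    · have hL : survB seq (k + 1) i = false :=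
        survB_false seq (k + 1) i (fun h => hB (h k (by omega) hik))
      rw [hL, hR1]
      simp [hB]
  · have hL : survB seq (k + 1) i = false :=
      survB_false seq (k + 1) i (fun h => hA (fun j h1 h2 => h j (by omega) h2))
    have hR : survB seq k i = false := survB_false seq k i hA
    rw [hL, hR]
    simp

theorem filter_or_perm {α : Type} (l : List α) (p q : α → Bool)
    (hdisj : ∀ a ∈ l, ¬(p a = true ∧ q a = true)) :
    (l.filter (fun a => p a || q a)).Perm (l.filter p ++ l.filter q) := by
  induction l with
  | nil => simp
  | cons a t ih =>
    have hd := hdisj a (by simp)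
    have ih' := ih (fun b hb => hdisj b (by simp [hb]))
    by_cases hp : p a = true
    · have hq : q a = false := by
        cases hq0 : q a
        · rfl
        · exact absurd ⟨hp, hq0⟩ hd
      simp only [List.filter_cons, hp, hq, Bool.true_or, if_true, List.cons_append]
      exact ih'.cons a
    · have hp' : p a = false := by rw [Bool.not_eq_true] at hp; exact hp
      by_cases hq : q a = true
      · simp only [List.filter_cons, hp', hq, Bool.false_or, if_true]
        exact (ih'.cons a).trans List.perm_middle.symm
      · have hq' : q a = false := by rw [Bool.not_eq_true] at hq; exact hq
        simp only [List.filter_cons, hp', hq', Bool.false_or]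
        exact ih'

theorem bool_not_and_le (a : Bool) (u v : Int) :
    (!(a && decide (u ≤ v))) = (!a || (a && decide (v < u))) := by
  by_cases h : u ≤ v
  · have h2 : ¬ v < u := not_lt.mpr h
    cases a <;> simp [h, h2]
  · have h2 : v < u := not_le.mp h
    cases a <;> simp [h, h2]

theorem SL_succ (seq : List Int) (k : Nat) :
    SL seq (k + 1) = (SL seq k).filter (fun i => decide (gI seq i ≤ gI seq k)) ++ [k] := by
  show (List.range (k + 1)).filter (survB seq (k + 1)) = _
  rw [List.range_succ, List.filter_append]
  congr 1
  · rw [SL, List.filter_filter]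
    apply List.filter_congr
    intro i hi
    have hik : i < k := by simpa using hi
    rw [survB_succ seq k i hik]
    exact Bool.and_comm _ _
  · simp [survB_succ_self seq k]

theorem NS_succ (seq : List Int) (k : Nat) :
    (NS seq (k + 1)).Perm
      (NS seq k ++ (SL seq k).filter (fun i => decide (gI seq k < gI seq i))) := by
  show ((List.range (k + 1)).filter (fun i => ! survB seq (k + 1) i)).Perm _
  rw [List.range_succ, List.filter_append]
  have hself : (! survB seq (k + 1) k) = false := by simp [survB_succ_self seq k]
  have hlast : [k].filter (fun i => ! survB seq (k + 1) i) = [] := by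
    simp [hself]
  rw [hlast, List.append_nil]
  have hcong : (List.range k).filter (fun i => ! survB seq (k + 1) i) =
      (List.range k).filter
        (fun i => (! survB seq k i) || (survB seq k i && decide (gI seq k < gI seq i))) := by
    apply List.filter_congr
    intro i hi
    have hik : i < k := by simpa using hi
    rw [survB_succ seq k i hik]
    exact bool_not_and_le _ _ _
  rw [hcong]
  have hdisj : ∀ a ∈ List.range k,
      ¬((! survB seq k a) = true ∧ (survB seq k a && decide (gI seq k < gI seq a)) = true) := by
    intro a _
    cases h : survB seq k a <;> simp_all
  refine (filter_or_perm _ _ _ hdisj).trans ?_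
  apply List.Perm.append_left
  rw [SL, List.filter_filter]
  apply List.Perm.of_eq
  apply List.filter_congr
  intro i _
  exact Bool.and_comm _ _

theorem stepA_eq' (stack s' : List (Int × Int)) (ans now x a' lft : Int)
    (h : popA x stack ans now now = (s', a', lft)) :
    stepA (stack, (ans, now)) x = ((x, lft) :: s', (a', now + x)) := by
  rw [stepA_eq, h]

theorem foldl_stack_cand (seq : List Int) (K : Nat) (xs : List Nat)
    (hxs : ∀ i ∈ xs, Rdef seq i = K) : ∀ (a : Int),
    (xs.map (fun i => (gI seq i, PS seq (Ldef seq i)))).foldl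
      (fun a p => max a (p.1 * (PS seq K - p.2))) a
      = (xs.map (cand seq)).foldl max a := by
  induction xs with
  | nil => intro a; rfl
  | cons i t ih =>
    intro a
    simp only [List.map_cons, List.foldl_cons]
    rw [ih (fun j hj => hxs j (by simp [hj]))]
    congr 1
    have hr := hxs i (by simp)
    simp [cand, hr]

theorem invA (seq : List Int) : ∀ (k : Nat), k ≤ seq.length →
    ∃ l : List Nat, l.Perm (NS seq k) ∧
      (seq.take k).foldl stepA ([], 0, 0) =
        ((SL seq k).reverse.map (fun i => (gI seq i, PS seq (Ldef seq i))),
         ((l.map (cand seq)).foldl max 0, PS seq k)) := by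
  intro k
  induction k with
  | zero =>
    intro _
    refine ⟨[], by simp [NS], ?_⟩
    simp [SL, PS]
  | succ k ih =>
    intro hk1
    have hk : k < seq.length := by omega
    obtain ⟨l, hperm, hstate⟩ := ih (by omega)
    have hsplit : SL seq k =
        (SL seq k).filter (fun i => decide (gI seq i ≤ gI seq k)) ++
        (SL seq k).filter (fun i => decide (gI seq k < gI seq i)) :=
      mono_filter_split seq (gI seq k) _ (SL_mono seq k)
    have htake : seq.take (k + 1) = seq.take k ++ [gI seq k] := by
      rw [List.take_add_one]
      simp [List.getElem?_eq_getElem hk, gI]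
    have hfold : (seq.take (k + 1)).foldl stepA ([], 0, 0) =
        stepA ((seq.take k).foldl stepA ([], 0, 0)) (gI seq k) := by
      rw [htake, List.foldl_append]
      simp
    rw [hstate] at hfold
    have hstack : (SL seq k).reverse.map (fun i => (gI seq i, PS seq (Ldef seq i))) =
        ((SL seq k).filter (fun i => decide (gI seq k < gI seq i))).reverse.map
          (fun i => (gI seq i, PS seq (Ldef seq i))) ++
        ((SL seq k).filter (fun i => decide (gI seq i ≤ gI seq k))).reverse.map
          (fun i => (gI seq i, PS seq (Ldef seq i))) := by
      conv_lhs => rw [hsplit]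
      simp
    have hpp : ∀ p ∈ ((SL seq k).filter (fun i => decide (gI seq k < gI seq i))).reverse.map
        (fun i => (gI seq i, PS seq (Ldef seq i))), gI seq k < p.1 := by
      intro p hp
      simp only [List.mem_map, List.mem_reverse, List.mem_filter] at hp
      obtain ⟨i, ⟨_, hi2⟩, rfl⟩ := hp
      simpa using hi2
    have hrest : ∀ y l' t',
        ((SL seq k).filter (fun i => decide (gI seq i ≤ gI seq k))).reverse.map
          (fun i => (gI seq i, PS seq (Ldef seq i))) = (y, l') :: t' → ¬ gI seq k < y := by
      intro y l' t' heq
      have hmem : (y, l') ∈ ((SL seq k).filter (fun i => decide (gI seq i ≤ gI seq k))).reverse.map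
          (fun i => (gI seq i, PS seq (Ldef seq i))) := by
        rw [heq]; simp
      simp only [List.mem_map, List.mem_reverse, List.mem_filter] at hmem
      obtain ⟨i, ⟨_, hi2⟩, heq2⟩ := hmem
      have hy : y = gI seq i := by
        have h3 := congrArg Prod.fst heq2
        simpa using h3.symm
      subst hy
      exact not_lt.mpr (by simpa using hi2)
    have hppA := popA_eq (gI seq k)
      (((SL seq k).filter (fun i => decide (gI seq k < gI seq i))).reverse.map
        (fun i => (gI seq i, PS seq (Ldef seq i))))
      (((SL seq k).filter (fun i => decide (gI seq i ≤ gI seq k))).reverse.map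
        (fun i => (gI seq i, PS seq (Ldef seq i))))
      hpp hrest ((l.map (cand seq)).foldl max 0) (PS seq k) (PS seq k)
    have hpairs := hsplit ▸ SL_sorted seq k
    rw [List.pairwise_append] at hpairs
    have hRpop : ∀ i ∈ (SL seq k).filter (fun i => decide (gI seq k < gI seq i)),
        Rdef seq i = k := by
      intro i hi
      have h1 := (List.mem_filter.mp hi).1
      have h2 : gI seq k < gI seq i := by simpa using (List.mem_filter.mp hi).2
      obtain ⟨h3a, h3b⟩ := (mem_SL seq k i).mp h1
      exact goRight_eq_of seq (gI seq i) seq.length (i + 1) k (by omega) (by omega)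
        (fun j hj1 hj2 => (survB_iff seq k i).mp h3b j hj2 (by omega)) (Or.inr h2)
    -- the left value handed to the pushed element equals PS (Ldef k)
    have hLFT :
        (((((SL seq k).filter (fun i => decide (gI seq k < gI seq i))).reverse.map
          (fun i => (gI seq i, PS seq (Ldef seq i)))).getLast?).map Prod.snd).getD (PS seq k)
          = PS seq (Ldef seq k) := by
      rcases hpop : (SL seq k).filter (fun i => decide (gI seq k < gI seq i)) with _ | ⟨y, ys⟩
      · -- no pops: Ldef k = k and the left value is PS k
        have hnosur : ∀ i ∈ SL seq k, gI seq i ≤ gI seq k := by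
          intro i hi
          conv at hi => rw [hsplit]
          rw [hpop] at hi
          simp only [List.append_nil, List.mem_filter] at hi
          simpa using hi.2
        have hLk : Ldef seq k = k := by
          apply goLeft_eq_of seq (gI seq k) k k le_rfl (fun j h1 h2 => by omega)
          rcases Nat.eq_zero_or_pos k with h0 | h0
          · left; exact h0
          · right
            have hk1m : k - 1 ∈ SL seq k := by
              rw [mem_SL]
              refine ⟨by omega, ?_⟩
              rw [survB_iff]
              intro j h1 h2
              omega
            have h3 := hnosur (k - 1) hk1m
            simpa [gI] using h3
        rw [hLk]
        simp
      · -- pops: the bottom popped survivor y satisfies Ldef y = Ldef k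
        have hymem : y ∈ (SL seq k).filter (fun i => decide (gI seq k < gI seq i)) := by
          rw [hpop]; simp
        have hy1 : y ∈ SL seq k := (List.mem_filter.mp hymem).1
        have hy2 : gI seq k < gI seq y := by
          have h3 := (List.mem_filter.mp hymem).2
          simpa using h3
        obtain ⟨hyk, hysv⟩ := (mem_SL seq k y).mp hy1
        have htaily : ∀ j, y ≤ j → j < k → gI seq y ≤ gI seq j := by
          intro j h1 h2
          rcases Nat.eq_or_lt_of_le h1 with h' | h'
          · rw [← h']
          · exact (survB_iff seq k y).mp hysv j h2 h'
        have hyslt : ∀ j ∈ ys, y < j := by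
          have hps := hpop ▸ hpairs.2.1
          exact fun j hj => (List.pairwise_cons.mp hps).1 j hj
        have hsurvcases : ∀ j, j < k → survB seq k j = true →
            j ∈ (SL seq k).filter (fun i => decide (gI seq i ≤ gI seq k)) ∨
            (gI seq k < gI seq j ∧ y ≤ j) := by
          intro j hjk hs
          have hmemj : j ∈ SL seq k := (mem_SL seq k j).mpr ⟨hjk, hs⟩
          conv at hmemj => rw [hsplit]
          rcases List.mem_append.mp hmemj with h' | h'
          · exact Or.inl h'
          · have hval : gI seq k < gI seq j := by
              simpa using (List.mem_filter.mp h').2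
            rw [hpop] at h'
            rcases List.mem_cons.mp h' with h'' | h''
            · exact Or.inr ⟨hval, by omega⟩
            · exact Or.inr ⟨hval, le_of_lt (hyslt j h'')⟩
        have hLyLk : Ldef seq y = Ldef seq k := by
          rcases List.eq_nil_or_concat
              ((SL seq k).filter (fun i => decide (gI seq i ≤ gI seq k)))
            with hkeep | ⟨kp, t, hkeep⟩
          · -- keep empty: both boundaries are 0
            have h1 : Ldef seq k = 0 := by
              apply Ldef_eq_zero seq k k le_rfl (fun j ha hb => by omega)
              intro j hjk hs
              rcases hsurvcases j hjk hs with h' | h'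
              · rw [hkeep] at h'
                simp at h'
              · exact h'.1
            have h2 : Ldef seq y = 0 := by
              apply Ldef_eq_zero seq y k (by omega) htaily
              intro j hjy hs
              rcases hsurvcases j (by omega) hs with h' | h'
              · rw [hkeep] at h'
                simp at h'
              · exact absurd h'.2 (by omega)
            rw [h1, h2]
          · -- keep ends with t: both boundaries are t + 1
            have htmem : t ∈ (SL seq k).filter (fun i => decide (gI seq i ≤ gI seq k)) := by
              rw [hkeep]; simp
            have htSL : t ∈ SL seq k := (List.mem_filter.mp htmem).1
            have htle : gI seq t ≤ gI seq k := by
              simpa using (List.mem_filter.mp htmem).2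
            have htk : t < k := ((mem_SL seq k t).mp htSL).1
            have hty : t < y := hpairs.2.2 t htmem y (by rw [hpop]; simp)
            have hkeeple : ∀ j ∈ (SL seq k).filter (fun i => decide (gI seq i ≤ gI seq k)),
                j ≤ t := by
              intro j hj
              have hpw := hkeep ▸ hpairs.1
              rw [List.concat_eq_append, List.pairwise_append] at hpw
              rw [hkeep, List.concat_eq_append] at hj
              rcases List.mem_append.mp hj with hj' | hj'
              · exact le_of_lt (hpw.2.2 j hj' t (by simp))
              · simp at hj'
                omega
            have h1 : Ldef seq k = t + 1 := by
              apply Ldef_eq_succ seq k k t le_rfl htk htle (fun j ha hb => by omega)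
              intro j hjt hjk hs
              rcases hsurvcases j hjk hs with h' | h'
              · exact absurd (hkeeple j h') (by omega)
              · exact h'.1
            have h2 : Ldef seq y = t + 1 := by
              apply Ldef_eq_succ seq y k t (by omega) hty
                (le_of_lt (lt_of_le_of_lt htle hy2)) htaily
              intro j hjt hjy hs
              rcases hsurvcases j (by omega) hs with h' | h'
              · exact absurd (hkeeple j h') (by omega)
              · exact absurd h'.2 (by omega)
            rw [h1, h2]
        simp [List.getLast?_reverse, hLyLk]
    have hppA' : popA (gI seq k)
        ((SL seq k).reverse.map (fun i => (gI seq i, PS seq (Ldef seq i))))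
        ((l.map (cand seq)).foldl max 0) (PS seq k) (PS seq k) =
        (((SL seq k).filter (fun i => decide (gI seq i ≤ gI seq k))).reverse.map
          (fun i => (gI seq i, PS seq (Ldef seq i))),
         (((SL seq k).filter (fun i => decide (gI seq k < gI seq i))).reverse.map
           (fun i => (gI seq i, PS seq (Ldef seq i)))).foldl
             (fun a p => max a (p.1 * (PS seq k - p.2))) ((l.map (cand seq)).foldl max 0),
         PS seq (Ldef seq k)) := by
      rw [hstack, hppA, hLFT]
    have hstep := stepA_eq' _ _ _ _ _ _ _ hppA'
    refine ⟨l ++ ((SL seq k).filter (fun i => decide (gI seq k < gI seq i))).reverse,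
      (hperm.append (List.reverse_perm _)).trans (NS_succ seq k).symm, ?_⟩
    rw [hfold, hstep]
    have hANS : (((SL seq k).filter (fun i => decide (gI seq k < gI seq i))).reverse.map
          (fun i => (gI seq i, PS seq (Ldef seq i)))).foldl
          (fun a p => max a (p.1 * (PS seq k - p.2))) ((l.map (cand seq)).foldl max 0)
        = (((l ++ ((SL seq k).filter (fun i => decide (gI seq k < gI seq i))).reverse).map
            (cand seq)).foldl max 0) := by
      rw [List.map_append, List.foldl_append,
        foldl_stack_cand seq k _ (fun i hi => hRpop i (List.mem_reverse.mp hi))]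
    rw [SL_succ seq k, PS_succ seq k hk, hANS]
    simp

theorem foldl_max_perm {l l' : List Int} (h : l.Perm l') (a : Int) :
    l.foldl max a = l'.foldl max a :=
  h.foldl_eq a

theorem solution_eq' (seq : List Int) (stack : List (Int × Int)) (ans now : Int)
    (h : seq.foldl stepA ([], 0, 0) = (stack, (ans, now))) :
    solution seq = (stack.reverse.map (fun p => p.1 * (now - p.2))).foldl max ans := by
  rw [solution_eq, h]

theorem Rdef_surv (seq : List Int) (i : Nat) (hi : i ∈ SL seq seq.length) :
    Rdef seq i = seq.length := by
  obtain ⟨h1, h2⟩ := (mem_SL seq seq.length i).mp hi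
  exact goRight_eq_of seq (gI seq i) seq.length (i + 1) seq.length (by omega) le_rfl
    (fun j hj1 hj2 => (survB_iff seq seq.length i).mp h2 j hj2 (by omega)) (Or.inl rfl)

-- ===== VERDICT (by name: the statement is the Claim_ definition above) =====
theorem solution_spec : Claim_equal_solution := by
  intro seq _ _
  unfold Spec_solution
  obtain ⟨l, hperm, hstate⟩ := invA seq seq.length le_rfl
  rw [List.take_length] at hstate
  rw [solution_eq' seq _ _ _ hstate]
  have hrev : ((SL seq seq.length).reverse.map
      (fun i => (gI seq i, PS seq (Ldef seq i)))).reverse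
      = (SL seq seq.length).map (fun i => (gI seq i, PS seq (Ldef seq i))) := by
    rw [List.map_reverse, List.reverse_reverse]
  rw [hrev, List.map_map]
  have hmapc : (SL seq seq.length).map ((fun p : Int × Int => p.1 * (PS seq seq.length - p.2)) ∘
      (fun i => (gI seq i, PS seq (Ldef seq i))))
      = (SL seq seq.length).map (cand seq) := by
    apply List.map_congr_left
    intro i hi
    have hr := Rdef_surv seq i hi
    simp [cand, hr, Function.comp]
  rw [hmapc, ← List.foldl_append, ← List.map_append]
  have hp : (l ++ SL seq seq.length).Perm (List.range seq.length) :=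
    ((hperm.append (List.Perm.refl _)).trans List.perm_append_comm).trans
      (List.filter_append_perm (survB seq seq.length) (List.range seq.length))
  rw [alt_eq]
  exact foldl_max_perm (hp.map (cand seq)) 0
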